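-- pv_equiv track=rewrite | github.com/xmslyz/horae_canonicae | indexer.py | minor_hour_psalm_solemnes
-- ===== SOURCE A (Python) =====
-- def minor_hour_psalm_solemnes(elements, i):
--     if elements[i] == "PSALMODIA" and elements[i + 1] == "Ant.  ":
--         joined = ""
--         for j, prayer in enumerate(elements[i:]):
--             if prayer == "CZYTANIE":
--                 break
--             elif prayer == "PSALMODIA":
--                 pass
--             else:
--                 joined += prayer + "\n"
--         return joined
-- ===== SOURCE B (Python) =====
-- def minor_hour_psalm_solemnes(elements, i):
--     if elements[i] == "PSALMODIA" and elements[i + 1] == "Ant.  ":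
--         seg = elements[i:]
--         if "CZYTANIE" in seg:
--             seg = seg[:seg.index("CZYTANIE")]
--         return "".join(p + "\n" for p in seg if p != "PSALMODIA")
-- ===== Notes on version B (the rewrite author's own statement) =====
-- stated objective: simpler
-- what changed: B pre-computes the CZYTANIE boundary with one .index scan, truncates the slice, and produces the result as a single filtered join, instead of A's fused loop that detects the terminator, skips PSALMODIA and accumulates with += inside one for/break loop.
import Mathlib
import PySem

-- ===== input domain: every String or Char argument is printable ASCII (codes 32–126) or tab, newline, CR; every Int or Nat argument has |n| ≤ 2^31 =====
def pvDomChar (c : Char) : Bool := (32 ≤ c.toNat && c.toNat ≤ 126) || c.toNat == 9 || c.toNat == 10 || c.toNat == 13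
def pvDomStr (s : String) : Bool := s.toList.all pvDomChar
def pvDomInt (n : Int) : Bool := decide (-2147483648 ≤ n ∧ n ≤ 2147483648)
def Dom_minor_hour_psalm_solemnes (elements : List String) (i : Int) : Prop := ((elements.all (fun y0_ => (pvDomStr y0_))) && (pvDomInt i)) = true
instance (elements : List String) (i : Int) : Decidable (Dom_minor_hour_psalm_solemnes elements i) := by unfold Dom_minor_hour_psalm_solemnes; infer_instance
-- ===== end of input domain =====

-- B locates the CZYTANIE boundary first and then emits the joined filtered slice in a
-- separate pass, instead of A's single fused detect/skip/accumulate loop: simpler decomposition.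

-- ===== PORT A =====
-- the for/break/pass/else accumulation loop of A, over elements[i:]
def pvALoop : List String → String → String
  | [], joined => joined
  | prayer :: rest, joined =>
    if prayer = "CZYTANIE" then joined
    else if prayer = "PSALMODIA" then pvALoop rest joined
    else pvALoop rest (joined ++ prayer ++ "\n")

def minor_hour_psalm_solemnes (elements : List String) (i : Int) : Option String :=
  match PySem.List.pyGet? elements i with
  | none => none  -- IndexError, excluded by Pre_
  | some e0 =>
    if e0 = "PSALMODIA" then
      match PySem.List.pyGet? elements (i + 1) with
      | none => none  -- IndexError, excluded by Pre_
      | some e1 =>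
        if e1 = "Ant.  " then
          some (pvALoop (PySem.List.slice elements (some i) none) "")
        else none
    else none

-- ===== PORT B =====
def minor_hour_psalm_solemnes_alt (elements : List String) (i : Int) : Option String :=
  match PySem.List.pyGet? elements i with
  | none => none  -- IndexError, excluded by Pre_
  | some e0 =>
    if e0 = "PSALMODIA" then
      match PySem.List.pyGet? elements (i + 1) with
      | none => none  -- IndexError, excluded by Pre_
      | some e1 =>
        if e1 = "Ant.  " then
          let seg := PySem.List.slice elements (some i) none
          let seg2 := match PySem.List.index? seg "CZYTANIE" with
            | some k => PySem.List.slice seg none (some (k : Int))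
            | none => seg
          some (String.join ((seg2.filter (fun p => p ≠ "PSALMODIA")).map (fun p => p ++ "\n")))
        else none
    else none

-- ===== PRECONDITION & SPEC =====
-- Pre_ excludes exactly the inputs where A raises IndexError: elements[i] out of range,
-- or (with elements[i] == "PSALMODIA", by short-circuit) elements[i+1] out of range.
def Pre_minor_hour_psalm_solemnes (elements : List String) (i : Int) : Prop :=
  PySem.Raise.InRange elements.length i ∧
  (PySem.List.pyGet? elements i = some "PSALMODIA" → PySem.Raise.InRange elements.length (i + 1))
instance (elements : List String) (i : Int) : Decidable (Pre_minor_hour_psalm_solemnes elements i) := by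
  unfold Pre_minor_hour_psalm_solemnes; infer_instance

def pvWitness_minor_hour_psalm_solemnes : List String × Int :=
  (["PSALMODIA", "Ant.  ", "Ps 1", "CZYTANIE", "tail"], 0)

def Spec_minor_hour_psalm_solemnes (elements : List String) (i : Int) (out : Option String) : Prop := out = minor_hour_psalm_solemnes_alt elements i
instance (elements : List String) (i : Int) (out : Option String) : Decidable (Spec_minor_hour_psalm_solemnes elements i out) := by unfold Spec_minor_hour_psalm_solemnes; infer_instance

-- ===== CLAIM (what is proved, stated in full; the proofs are below) =====
def Claim_equal_minor_hour_psalm_solemnes : Prop := ∀ (elements : List String) (i : Int), Dom_minor_hour_psalm_solemnes elements i → Pre_minor_hour_psalm_solemnes elements i → Spec_minor_hour_psalm_solemnes elements i (minor_hour_psalm_solemnes elements i)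

-- ===== LEMMAS AND PROOFS =====

-- B's computation on a segment, as a function of the list alone
def pvTrunc (l : List String) : List String :=
  match PySem.List.index? l "CZYTANIE" with
  | some k => PySem.List.slice l none (some (k : Int))
  | none => l

def pvBJoin (l : List String) : String :=
  String.join (((pvTrunc l).filter (fun p => p ≠ "PSALMODIA")).map (fun p => p ++ "\n"))

theorem pvFoldl_append (l : List String) : ∀ a : String,
    List.foldl (fun r s => r ++ s) a l = a ++ List.foldl (fun r s => r ++ s) "" l := by
  induction l with
  | nil => simp
  | cons x xs ih => intro a; simp only [List.foldl_cons]; rw [ih, ih ("" ++ x)]; simp [String.append_assoc]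

theorem pvJoin_cons (a : String) (l : List String) : String.join (a :: l) = a ++ String.join l := by
  simp only [String.join, List.foldl_cons]; rw [pvFoldl_append]; simp

theorem pvTrunc_cons_stop (rest : List String) :
    pvTrunc ("CZYTANIE" :: rest) = [] := by
  unfold pvTrunc
  rw [PySem.List.index?_cons_self]
  simp [PySem.List.slice]

theorem pvTrunc_cons (p : String) (rest : List String) (hp : p ≠ "CZYTANIE") :
    pvTrunc (p :: rest) = p :: pvTrunc rest := by
  unfold pvTrunc
  rw [PySem.List.index?_cons_of_ne rest hp]
  cases h : PySem.List.index? rest "CZYTANIE" with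
  | none => simp
  | some k =>
    simp only [Option.map_some]
    rw [show ((k + 1 : Nat) : Int) = ((k : Nat) : Int) + 1 by push_cast; ring]
    rw [PySem.List.slice_to_natCast] -- needs the cast form; rewrite back
    rw [show ((k : Nat) : Int) + 1 = (((k + 1 : Nat)) : Int) by push_cast; ring]
    rw [PySem.List.slice_to_natCast]
    simp [List.take_succ_cons]

theorem pvBJoin_nil : pvBJoin [] = "" := by simp [pvBJoin, pvTrunc, PySem.List.index?, String.join]

theorem pvALoop_eq (l : List String) : ∀ acc : String, pvALoop l acc = acc ++ pvBJoin l := by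
  induction l with
  | nil => intro acc; simp [pvALoop, pvBJoin_nil]
  | cons p rest ih =>
    intro acc
    by_cases hc : p = "CZYTANIE"
    · subst hc
      simp [pvALoop, pvBJoin, pvTrunc_cons_stop, String.join]
    · by_cases hps : p = "PSALMODIA"
      · subst hps
        simp only [pvALoop, if_neg hc, reduceIte]
        rw [ih acc]
        simp [pvBJoin, pvTrunc_cons _ _ hc]
      · simp only [pvALoop, if_neg hc, if_neg hps]
        rw [ih]
        simp only [pvBJoin, pvTrunc_cons _ _ hc, List.filter_cons]
        rw [if_pos (by simp [hps]), List.map_cons, pvJoin_cons]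
        simp [String.append_assoc]

-- ===== VERDICT (by name: the statement is the Claim_ definition above) =====
theorem minor_hour_psalm_solemnes_spec : Claim_equal_minor_hour_psalm_solemnes := by
  intro elements i _ _
  unfold Spec_minor_hour_psalm_solemnes minor_hour_psalm_solemnes minor_hour_psalm_solemnes_alt
  cases h0 : PySem.List.pyGet? elements i with
  | none => rfl
  | some e0 =>
    by_cases he0 : e0 = "PSALMODIA"
    · simp only [if_pos he0]
      cases h1 : PySem.List.pyGet? elements (i + 1) with
      | none => rfl
      | some e1 =>
        by_cases he1 : e1 = "Ant.  "
        · simp only [if_pos he1]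
          rw [pvALoop_eq _ ""]
          simp [pvBJoin, pvTrunc]
        · simp [if_neg he1]
    · simp [if_neg he0]
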